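-- pv_equiv track=rewrite | github.com/CCallahanIV/CodeWars | 401-code-katas/string-pyramid/string_pyramid.py | watch_pyramid_from_the_side
-- ===== SOURCE A (Python) =====
-- def watch_pyramid_from_the_side(characters):
--     """Given a string of characters, make the triangle from the side."""
--     if characters:
--         space_count = 0
--         count = len(characters)
--         out_string = ""
--         for char in characters:
--             out_string += " " * space_count + char * (2 * count - 1) +\
--                           " " * space_count + "\n"
--             count -= 1
--             space_count += 1
--         return out_string[-2::-1]
--     else:
--         return characters
-- ===== SOURCE B (Python) =====
-- def watch_pyramid_from_the_side(characters):
--     """Given a string of characters, make the triangle from the side."""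
--     if not characters:
--         return characters
--     n = len(characters)
--     lines = []
--     for k, ch in enumerate(reversed(characters)):
--         sp = " " * (n - 1 - k)
--         lines.append(sp + ch * (2 * k + 1) + sp)
--     return "\n".join(lines)
-- ===== Notes on version B (the rewrite author's own statement) =====
-- stated objective: simpler
-- what changed: B builds each row directly in final top-to-bottom order (spaces, char repeated 2k+1 times, spaces) and joins the rows with newline separators, instead of A's accumulating a bottom-up string with trailing newlines and recovering the answer via the reversal slice [-2::-1].
import Mathlib
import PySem

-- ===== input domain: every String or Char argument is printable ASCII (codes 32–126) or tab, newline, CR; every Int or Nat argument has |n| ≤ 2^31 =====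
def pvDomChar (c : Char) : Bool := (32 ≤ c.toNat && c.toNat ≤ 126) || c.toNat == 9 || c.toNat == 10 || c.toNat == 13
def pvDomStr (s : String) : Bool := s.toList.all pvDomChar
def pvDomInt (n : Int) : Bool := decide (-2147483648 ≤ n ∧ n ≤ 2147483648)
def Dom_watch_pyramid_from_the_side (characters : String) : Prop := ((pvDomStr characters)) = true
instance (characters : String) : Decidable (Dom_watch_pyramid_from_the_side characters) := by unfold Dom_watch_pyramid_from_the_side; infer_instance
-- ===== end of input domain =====

-- B builds the rows directly in final top-to-bottom order and joins them with newlines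
-- (simpler decomposition); A accumulates the rows bottom-up, each with a trailing newline,
-- and recovers the final string by the reversal slice [-2::-1].

-- ===== PORT A =====
def pyramidLoopA : List Char → Int → Int → List Char → List Char
  | [], _, _, out => out
  | c :: rest, space_count, count, out =>
      pyramidLoopA rest (space_count + 1) (count - 1)
        (out ++ List.replicate space_count.toNat ' '
             ++ List.replicate (2 * count - 1).toNat c
             ++ List.replicate space_count.toNat ' ' ++ ['\n'])

def watch_pyramid_from_the_side (characters : String) : String :=
  if characters.toList ≠ [] then
    -- out_string[-2::-1]; the slice never raises (step ≠ 0), so getD [] is never the fallback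
    String.ofList ((PySem.List.slice?
      (pyramidLoopA characters.toList 0 (characters.toList.length : Int) [])
      (some (-2)) none (-1)).getD [])
  else characters

-- ===== PORT B =====
def watch_pyramid_from_the_side_alt (characters : String) : String :=
  if characters.toList = [] then characters
  else
    let n : Int := characters.toList.length
    String.ofList (PySem.Chars.join ['\n']
      ((PySem.List.enumerate characters.toList.reverse).map (fun p =>
        List.replicate (n - 1 - p.1).toNat ' '
          ++ List.replicate (2 * p.1 + 1).toNat p.2
          ++ List.replicate (n - 1 - p.1).toNat ' ')))

-- ===== PRECONDITION & SPEC =====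
def Spec_watch_pyramid_from_the_side (characters : String) (out : String) : Prop := out = watch_pyramid_from_the_side_alt characters
instance (characters : String) (out : String) : Decidable (Spec_watch_pyramid_from_the_side characters out) := by unfold Spec_watch_pyramid_from_the_side; infer_instance

-- ===== CLAIM (what is proved, stated in full; the proofs are below) =====
def Claim_equal_watch_pyramid_from_the_side : Prop := ∀ (characters : String), Dom_watch_pyramid_from_the_side characters → Spec_watch_pyramid_from_the_side characters (watch_pyramid_from_the_side characters)

-- ===== LEMMAS AND PROOFS =====

/-- The rows A's loop appends, without the trailing newlines. -/
def rowsA : List Char → Int → Int → List (List Char)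
  | [], _, _ => []
  | c :: rest, sc, cnt =>
      (List.replicate sc.toNat ' ' ++ List.replicate (2 * cnt - 1).toNat c
        ++ List.replicate sc.toNat ' ') :: rowsA rest (sc + 1) (cnt - 1)

lemma loopA_eq : ∀ (cs : List Char) (sc cnt : Int) (out : List Char),
    pyramidLoopA cs sc cnt out = out ++ (rowsA cs sc cnt).flatMap (· ++ ['\n']) := by
  intro cs
  induction cs with
  | nil => intro sc cnt out; simp [pyramidLoopA, rowsA]
  | cons c rest ih =>
      intro sc cnt out
      simp [pyramidLoopA, rowsA, ih, List.append_assoc]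

lemma rowsA_length : ∀ (cs : List Char) (sc cnt : Int), (rowsA cs sc cnt).length = cs.length := by
  intro cs
  induction cs with
  | nil => intro sc cnt; simp [rowsA]
  | cons c rest ih => intro sc cnt; simp [rowsA, ih]

lemma rowsA_getElem : ∀ (cs : List Char) (sc cnt : Int) (k : Nat) (h : k < cs.length),
    (rowsA cs sc cnt)[k]'(by rw [rowsA_length]; exact h) =
      List.replicate (sc + k).toNat ' '
        ++ List.replicate (2 * (cnt - k) - 1).toNat (cs[k]'h)
        ++ List.replicate (sc + k).toNat ' ' := by
  intro cs
  induction cs with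
  | nil => intro sc cnt k h; simp at h
  | cons c rest ih =>
      intro sc cnt k h
      cases k with
      | zero => simp [rowsA]
      | succ k' =>
          have h' : k' < rest.length := by simpa using h
          simp only [rowsA, List.getElem_cons_succ]
          rw [show (sc + ((k' + 1 : Nat) : Int)) = (sc + 1) + (k' : Int) by push_cast; ring,
              show (cnt - ((k' + 1 : Nat) : Int)) = (cnt - 1) - (k' : Int) by push_cast; ring]
          exact ih (sc + 1) (cnt - 1) k' h'

lemma join_concat (s : List Char) (as : List (List Char)) (b : List Char) (h : as ≠ []) :
    PySem.Chars.join s (as ++ [b]) = PySem.Chars.join s as ++ s ++ b := by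
  induction as with
  | nil => exact absurd rfl h
  | cons a as' ih =>
      cases as' with
      | nil => simp [PySem.Chars.join, List.intercalate]
      | cons a' as'' =>
          have := ih (by simp)
          simp only [PySem.Chars.join, List.intercalate] at this ⊢
          simp_all [List.append_assoc]

lemma flat_dropLast_reverse : ∀ (rs : List (List Char)), rs ≠ [] →
    ((rs.flatMap (· ++ ['\n'])).dropLast).reverse =
      PySem.Chars.join ['\n'] ((rs.map List.reverse).reverse) := by
  intro rs
  induction rs with
  | nil => intro h; exact absurd rfl h
  | cons r rest ih =>
      intro _
      cases rest with
      | nil =>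
          simp [PySem.Chars.join, List.intercalate]
      | cons r' rest' =>
          have hne : (r' :: rest').flatMap (· ++ ['\n']) ≠ [] := by
            simp [List.flatMap_cons]
          have ihh := ih (by simp)
          calc (((r :: r' :: rest').flatMap (· ++ ['\n'])).dropLast).reverse
              = (((r ++ ['\n']) ++ (r' :: rest').flatMap (· ++ ['\n'])).dropLast).reverse := by
                simp [List.flatMap_cons, List.append_assoc]
            _ = ((r ++ ['\n']) ++ ((r' :: rest').flatMap (· ++ ['\n'])).dropLast).reverse := by
                rw [List.dropLast_append_of_ne_nil hne]
            _ = (((r' :: rest').flatMap (· ++ ['\n'])).dropLast).reverse ++ ['\n'] ++ r.reverse := by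
                simp [List.reverse_append, List.append_assoc]
            _ = PySem.Chars.join ['\n'] (((r' :: rest').map List.reverse).reverse) ++ ['\n'] ++ r.reverse := by
                rw [ihh]
            _ = PySem.Chars.join ['\n'] (((r :: r' :: rest').map List.reverse).reverse) := by
                rw [show ((r :: r' :: rest').map List.reverse).reverse
                      = ((r' :: rest').map List.reverse).reverse ++ [r.reverse] by simp]
                rw [join_concat _ _ _ (by simp)]

lemma revFilter {α : Type} : ∀ (m : Nat) (xs : List α), m ≤ xs.length →
    List.filterMap (fun k => xs[m - 1 - k]?) (List.range m) = (xs.take m).reverse := by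
  intro m
  induction m with
  | zero => intro xs h; simp
  | succ m' ih =>
      intro xs h
      cases xs with
      | nil => simp at h
      | cons y ys =>
          have h' : m' ≤ ys.length := by simpa using h
          rw [List.range_succ, List.filterMap_append]
          have hcongr : List.filterMap (fun k => (y :: ys)[m' + 1 - 1 - k]?) (List.range m')
              = List.filterMap (fun k => ys[m' - 1 - k]?) (List.range m') := by
            apply List.filterMap_congr
            intro k hk
            have hk' : k < m' := List.mem_range.mp hk
            have : m' + 1 - 1 - k = (m' - 1 - k) + 1 := by omega
            rw [this, List.getElem?_cons_succ]
          rw [hcongr, ih ys h']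
          simp [List.take_succ_cons]

lemma slice_rev (xs : List Char) (h : 2 ≤ xs.length) :
    PySem.List.slice? xs (some (-2)) none (-1) = some (xs.dropLast.reverse) := by
  simp only [PySem.List.slice?, PySem.List.sliceIndices]
  norm_num
  rw [if_pos (by omega : 1 < xs.length)]
  have hmax : max (-2 + (xs.length : Int)) (-1) = (xs.length : Int) - 2 := by omega
  rw [hmax]
  have hcnt : ((xs.length : Int) - 2 + 1).toNat = xs.length - 1 := by omega
  rw [hcnt]
  have hcongr : List.filterMap (fun k : Nat => xs[((xs.length : Int) - 2 + -(k : Int)).toNat]?)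
      (List.range (xs.length - 1))
      = List.filterMap (fun k : Nat => xs[(xs.length - 1) - 1 - k]?) (List.range (xs.length - 1)) := by
    apply List.filterMap_congr
    intro k hk
    have hk' : k < xs.length - 1 := List.mem_range.mp hk
    have : ((xs.length : Int) - 2 + -(k : Int)).toNat = (xs.length - 1) - 1 - k := by omega
    rw [this]
  rw [hcongr, revFilter (xs.length - 1) xs (by omega), List.dropLast_eq_take]

lemma rows_len_ge (cs : List Char) (h : cs ≠ []) :
    2 ≤ ((rowsA cs 0 (cs.length : Int)).flatMap (· ++ ['\n'])).length := by
  cases cs with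
  | nil => exact absurd rfl h
  | cons c rest =>
      simp only [rowsA, List.flatMap_cons, List.length_append, List.length_replicate,
        List.length_cons, List.length_nil]
      have : (2 * ((c :: rest).length : Int) - 1).toNat = 2 * rest.length + 1 := by
        simp only [List.length_cons]; omega
      simp only [List.length_cons] at this ⊢
      omega

-- ===== VERDICT (by name: the statement is the Claim_ definition above) =====
theorem watch_pyramid_from_the_side_spec : Claim_equal_watch_pyramid_from_the_side := by
  intro characters _
  unfold Spec_watch_pyramid_from_the_side
  unfold watch_pyramid_from_the_side watch_pyramid_from_the_side_alt
  by_cases hnil : characters.toList = []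
  · simp [hnil]
  · rw [if_pos hnil, if_neg hnil]
    congr 1
    have hrows : rowsA characters.toList 0 (characters.toList.length : Int) ≠ [] := by
      intro hemp
      have hl := rowsA_length characters.toList 0 (characters.toList.length : Int)
      rw [hemp] at hl
      exact hnil (List.length_eq_zero_iff.mp hl.symm)
    rw [loopA_eq, List.nil_append,
        slice_rev _ (rows_len_ge characters.toList hnil), Option.getD_some,
        flat_dropLast_reverse _ hrows]
    congr 1
    apply List.ext_getElem
    · simp [rowsA_length]
    · intro k h1 h2
      have hk : k < characters.toList.length := by
        simpa [rowsA_length] using h1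
      rw [List.getElem_reverse, List.getElem_map]
      rw [List.getElem_map, PySem.List.getElem_enumerate]
      simp only [List.length_map, rowsA_length]
      rw [rowsA_getElem characters.toList 0 (characters.toList.length : Int)
            (characters.toList.length - 1 - k) (by omega)]
      simp only [List.reverse_append, List.reverse_replicate, List.append_assoc]
      have hcr : characters.toList.reverse[k]'(by simpa using hk)
          = characters.toList[characters.toList.length - 1 - k]'(by omega) :=
        List.getElem_reverse _
      have e1 : ((0 : Int) + ((characters.toList.length - 1 - k : Nat) : Int)).toNat
          = characters.toList.length - 1 - k := by omega
      have e2 : (2 * ((characters.toList.length : Int) - ((characters.toList.length - 1 - k : Nat) : Int)) - 1).toNat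
          = 2 * k + 1 := by
        have : ((characters.toList.length - 1 - k : Nat) : Int)
            = (characters.toList.length : Int) - 1 - k := by omega
        rw [this]; omega
      have e3 : ((characters.toList.length : Int) - 1 - (0 + (k : Int))).toNat
          = characters.toList.length - 1 - k := by omega
      have e4 : (2 * (0 + (k : Int)) + 1).toNat = 2 * k + 1 := by omega
      simp only [e1, e2, e3, e4, hcr]
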